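-- pv_equiv track=rewrite | github.com/gogamerstg/UnwantedFinder | ml/risk_engine.py | deobfuscate_text
-- ===== SOURCE A (Python) =====
-- def deobfuscate_text(text):
--     """
--     Normalizes 'leetspeak' characters to standard English letters.
--     """
--     text = str(text).lower()
--     replacements = {
--         '@': 'a', '4': 'a', '/\\': 'a',
--         '3': 'e', '#': 'e',
--         '1': 'i', '!': 'i', '|': 'i',
--         '0': 'o',
--         '$': 's', '5': 's', '&': 's',
--         '+': 't', '7': 't'
--     }
--     for symbol, char in replacements.items():
--         text = text.replace(symbol, char)
--     return text
-- ===== SOURCE B (Python) =====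
-- def deobfuscate_text(text):
--     """
--     Normalizes 'leetspeak' characters to standard English letters.
--     Single left-to-right pass with a lookup table instead of 14 full-string replace passes.
--     """
--     text = str(text).lower()
--     groups = {'a': '@4', 'e': '3#', 'i': '1!|', 'o': '0', 's': '$5&', 't': '+7'}
--     table = {sym: letter for letter, syms in groups.items() for sym in syms}
--     out = []
--     i = 0
--     n = len(text)
--     while i < n:
--         if text[i] == '/' and i + 1 < n and text[i + 1] == '\\':
--             out.append('a')
--             i += 2
--         else:
--             c = text[i]
--             out.append(table.get(c, c))
--             i += 1
--     return ''.join(out)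
-- ===== Notes on version B (the rewrite author's own statement) =====
-- stated objective: alternative
-- what changed: Replaced A's 14 sequential full-string str.replace passes with a single left-to-right scan that uses a char lookup table and an explicit two-character lookahead for the '/\' key.
import Mathlib
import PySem

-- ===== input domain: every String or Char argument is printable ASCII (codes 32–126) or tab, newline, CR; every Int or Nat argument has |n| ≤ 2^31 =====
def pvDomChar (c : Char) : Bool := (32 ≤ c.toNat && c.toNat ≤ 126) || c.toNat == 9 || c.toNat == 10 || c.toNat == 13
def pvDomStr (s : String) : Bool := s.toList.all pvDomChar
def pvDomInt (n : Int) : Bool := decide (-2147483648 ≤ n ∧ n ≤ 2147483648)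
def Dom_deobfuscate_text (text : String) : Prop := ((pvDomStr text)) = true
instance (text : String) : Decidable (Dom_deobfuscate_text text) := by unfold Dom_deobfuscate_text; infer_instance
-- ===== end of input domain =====

-- B replaces A's 14 sequential full-string replace passes by one left-to-right pass with a
-- char lookup table and an explicit lookahead for the two-character key "/\\" (objective: alternative single-pass algorithm).

-- ===== PORT A =====

def pvReplacements : PySem.Dict String String := PySem.Dict.ofList
  [("@", "a"), ("4", "a"), ("/\\", "a"),
   ("3", "e"), ("#", "e"),
   ("1", "i"), ("!", "i"), ("|", "i"),
   ("0", "o"),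
   ("$", "s"), ("5", "s"), ("&", "s"),
   ("+", "t"), ("7", "t")]

def deobfuscate_text (text : String) : String :=
  pvReplacements.items.foldl (fun t p => PySem.Str.replace t p.1 p.2) (PySem.Str.lower text)


-- ===== PORT B =====
def pvGroups : PySem.Dict Char String := PySem.Dict.ofList
  [('a', "@4"), ('e', "3#"), ('i', "1!|"), ('o', "0"), ('s', "$5&"), ('t', "+7")]

def pvTable : PySem.Dict Char Char := PySem.Dict.ofList
  (pvGroups.items.flatMap (fun p => p.2.toList.map (fun sym => (sym, p.1))))

def pvAltGo : List Char → List Char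
  | [] => []
  | [c] => [pvTable.getD c c]
  | c :: d :: t =>
    if c = '/' ∧ d = '\\' then 'a' :: pvAltGo t
    else pvTable.getD c c :: pvAltGo (d :: t)

def deobfuscate_text_alt (text : String) : String :=
  String.ofList (pvAltGo (PySem.Str.lower text).toList)


-- ===== PRECONDITION & SPEC =====
def Spec_deobfuscate_text (text : String) (out : String) : Prop := out = deobfuscate_text_alt text
instance (text : String) (out : String) : Decidable (Spec_deobfuscate_text text out) := by unfold Spec_deobfuscate_text; infer_instance

-- ===== CLAIM (what is proved, stated in full; the proofs are below) =====
def Claim_equal_deobfuscate_text : Prop := ∀ (text : String), Dom_deobfuscate_text text → Spec_deobfuscate_text text (deobfuscate_text text)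

-- ===== LEMMAS AND PROOFS =====
def mrep (o n c : Char) : Char := if c = o then n else c

def pvPairRep : List Char → List Char
  | [] => []
  | [c] => [c]
  | c :: d :: t =>
    if c = '/' ∧ d = '\\' then 'a' :: pvPairRep t
    else c :: pvPairRep (d :: t)

theorem pvItems : pvReplacements.items =
  [("@", "a"), ("4", "a"), ("/\\", "a"), ("3", "e"), ("#", "e"), ("1", "i"), ("!", "i"),
   ("|", "i"), ("0", "o"), ("$", "s"), ("5", "s"), ("&", "s"), ("+", "t"), ("7", "t")] := by rfl

theorem tbl_ok (c : Char) :
    mrep '7' 't' (mrep '+' 't' (mrep '&' 's' (mrep '5' 's' (mrep '$' 's' (mrep '0' 'o'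
      (mrep '|' 'i' (mrep '!' 'i' (mrep '1' 'i' (mrep '#' 'e' (mrep '3' 'e'
      (mrep '4' 'a' (mrep '@' 'a' c)))))))))))) = pvTable.getD c c := by
  by_cases h1 : c = '@'
  · subst h1; decide
  by_cases h2 : c = '4'
  · subst h2; decide
  by_cases h3 : c = '3'
  · subst h3; decide
  by_cases h4 : c = '#'
  · subst h4; decide
  by_cases h5 : c = '1'
  · subst h5; decide
  by_cases h6 : c = '!'
  · subst h6; decide
  by_cases h7 : c = '|'
  · subst h7; decide
  by_cases h8 : c = '0'
  · subst h8; decide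
  by_cases h9 : c = '$'
  · subst h9; decide
  by_cases h10 : c = '5'
  · subst h10; decide
  by_cases h11 : c = '&'
  · subst h11; decide
  by_cases h12 : c = '+'
  · subst h12; decide
  by_cases h13 : c = '7'
  · subst h13; decide
  have hi : pvTable.items = [('@','a'),('4','a'),('3','e'),('#','e'),('1','i'),('!','i'),('|','i'),('0','o'),('$','s'),('5','s'),('&','s'),('+','t'),('7','t')] := rfl
  simp only [PySem.Dict.getD, PySem.Dict.get?, hi, List.find?]
  have e1 : ('@' == c) = false := beq_eq_false_iff_ne.mpr (Ne.symm h1)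
  have e2 : ('4' == c) = false := beq_eq_false_iff_ne.mpr (Ne.symm h2)
  have e3 : ('3' == c) = false := beq_eq_false_iff_ne.mpr (Ne.symm h3)
  have e4 : ('#' == c) = false := beq_eq_false_iff_ne.mpr (Ne.symm h4)
  have e5 : ('1' == c) = false := beq_eq_false_iff_ne.mpr (Ne.symm h5)
  have e6 : ('!' == c) = false := beq_eq_false_iff_ne.mpr (Ne.symm h6)
  have e7 : ('|' == c) = false := beq_eq_false_iff_ne.mpr (Ne.symm h7)
  have e8 : ('0' == c) = false := beq_eq_false_iff_ne.mpr (Ne.symm h8)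
  have e9 : ('$' == c) = false := beq_eq_false_iff_ne.mpr (Ne.symm h9)
  have e10 : ('5' == c) = false := beq_eq_false_iff_ne.mpr (Ne.symm h10)
  have e11 : ('&' == c) = false := beq_eq_false_iff_ne.mpr (Ne.symm h11)
  have e12 : ('+' == c) = false := beq_eq_false_iff_ne.mpr (Ne.symm h12)
  have e13 : ('7' == c) = false := beq_eq_false_iff_ne.mpr (Ne.symm h13)
  simp [mrep, e1, e2, e3, e4, e5, e6, e7, e8, e9, e10, e11, e12, e13, h1, h2, h3, h4, h5, h6, h7, h8, h9, h10, h11, h12, h13]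

theorem mrep_ne (o n x c : Char) (hn : n ≠ x) (ho : o ≠ x) : mrep o n c = x → c = x := by
  unfold mrep
  split_ifs with h
  · intro he; exact absurd he hn
  · exact id

theorem pairRep_map (h : Char → Char)
    (hs : h '/' = '/') (hb : h '\\' = '\\') (ha : h 'a' = 'a')
    (hins : ∀ c, h c = '/' → c = '/') (hinb : ∀ c, h c = '\\' → c = '\\') :
    ∀ l : List Char, pvPairRep (l.map h) = (pvPairRep l).map h := by
  intro l
  induction l using pvPairRep.induct with
  | case1 => simp [pvPairRep]
  | case2 c => simp [pvPairRep]
  | case3 c d t hcd ih =>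
    obtain ⟨hc, hd⟩ := hcd
    subst hc; subst hd
    simp only [List.map_cons, hs, hb]
    rw [pvPairRep, if_pos ⟨rfl, rfl⟩, pvPairRep, if_pos ⟨rfl, rfl⟩]
    simp [ha, ih]
  | case4 c d t hcd ih =>
    have hcd' : ¬ (h c = '/' ∧ h d = '\\') := fun ⟨x, y⟩ => hcd ⟨hins c x, hinb d y⟩
    simp only [List.map_cons]
    rw [pvPairRep, if_neg hcd', pvPairRep, if_neg hcd]
    simp only [List.map_cons, ← ih, List.map_cons]

theorem go_single (o n : Char) : ∀ (fuel : Nat) (l acc : List Char), l.length ≤ fuel →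
    PySem.Chars.replace.go [o] [n] fuel l acc = acc.reverse ++ l.map (mrep o n) := by
  intro fuel
  induction fuel with
  | zero =>
    intro l acc h
    have hl : l = [] := List.eq_nil_of_length_eq_zero (Nat.le_zero.mp h)
    subst hl
    rw [PySem.Chars.replace.go.eq_def]
    simp
  | succ fuel ih =>
    intro l acc h
    cases l with
    | nil => rw [PySem.Chars.replace.go.eq_def]; simp
    | cons c t =>
      rw [PySem.Chars.replace.go.eq_def]
      simp only [List.isPrefixOf, Bool.and_true, List.length_cons] at *
      by_cases hc : o = c
      · subst hc
        simp only [BEq.rfl, if_true, List.length_nil, List.drop_succ_cons, List.drop_zero,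
          List.reverse_singleton, List.singleton_append]
        rw [ih t (n :: acc) (by omega)]
        simp [mrep]
      · have hb : (o == c) = false := by simp [hc]
        rw [hb]
        simp only [Bool.false_eq_true, if_false]
        rw [ih t (c :: acc) (by omega)]
        have hm : mrep o n c = c := by
          simp only [mrep, ite_eq_right_iff]
          intro h'; exact absurd h'.symm hc
        simp [hm]

theorem replace_single (l : List Char) (o n : Char) :
    PySem.Chars.replace l [o] [n] = l.map (mrep o n) := by
  rw [PySem.Chars.replace]
  simp only [List.isEmpty_cons, Bool.false_eq_true, if_false]
  rw [go_single o n l.length l [] (Nat.le_refl _)]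
  simp

theorem go_pair : ∀ (fuel : Nat) (l acc : List Char), l.length ≤ fuel →
    PySem.Chars.replace.go ['/', '\\'] ['a'] fuel l acc = acc.reverse ++ pvPairRep l := by
  intro fuel
  induction fuel with
  | zero =>
    intro l acc h
    have hl : l = [] := List.eq_nil_of_length_eq_zero (Nat.le_zero.mp h)
    subst hl
    rw [PySem.Chars.replace.go.eq_def]
    simp [pvPairRep]
  | succ fuel ih =>
    intro l acc h
    cases l with
    | nil => rw [PySem.Chars.replace.go.eq_def]; simp [pvPairRep]
    | cons c t0 =>
     cases t0 with
     | nil =>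
      rw [PySem.Chars.replace.go.eq_def]
      simp only [List.isPrefixOf, Bool.and_true, Bool.and_false]
      simp only [Bool.false_eq_true, if_false]
      rw [ih [] (c :: acc) (by simp)]
      simp [pvPairRep]
     | cons d t =>
      rw [PySem.Chars.replace.go.eq_def]
      simp only [List.length_cons] at h
      simp only [List.isPrefixOf, Bool.and_true]
      by_cases hcd : c = '/' ∧ d = '\\'
      · obtain ⟨hc, hd⟩ := hcd
        subst hc; subst hd
        simp only [BEq.rfl, Bool.true_and, Bool.and_self, if_true]
        simp only [List.length_cons, List.length_nil, List.drop_succ_cons,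
          List.drop_zero, List.reverse_singleton, List.singleton_append]
        rw [ih t ('a' :: acc) (by omega)]
        simp [pvPairRep]
      · have hb : (('/' == c) && ('\\' == d)) = false := by
          by_cases h1 : c = '/'
          · subst h1
            have h2 : ¬ d = '\\' := fun hx => hcd ⟨rfl, hx⟩
            simp [beq_iff_eq, Ne.symm h2]
          · simp [beq_iff_eq, Ne.symm h1]
        rw [hb]
        simp only [Bool.false_eq_true, if_false]
        rw [ih (d :: t) (c :: acc) (by simp only [List.length_cons]; omega)]
        rw [pvPairRep, if_neg hcd]
        simp

theorem replace_pair (l : List Char) :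
    PySem.Chars.replace l ['/', '\\'] ['a'] = pvPairRep l := by
  rw [PySem.Chars.replace]
  simp only [List.isEmpty_cons, Bool.false_eq_true, if_false]
  rw [go_pair l.length l [] (Nat.le_refl _)]
  simp

theorem altGo_eq (l : List Char) :
    pvAltGo l = List.map (mrep '7' 't') (List.map (mrep '+' 't') (List.map (mrep '&' 's')
      (List.map (mrep '5' 's') (List.map (mrep '$' 's') (List.map (mrep '0' 'o')
      (List.map (mrep '|' 'i') (List.map (mrep '!' 'i') (List.map (mrep '1' 'i')
      (List.map (mrep '#' 'e') (List.map (mrep '3' 'e') (List.map (mrep '4' 'a')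
      (List.map (mrep '@' 'a') (pvPairRep l))))))))))))) := by
  induction l using pvPairRep.induct with
  | case1 => simp [pvAltGo, pvPairRep]
  | case2 c => simp only [pvAltGo, pvPairRep, List.map_cons, List.map_nil, tbl_ok]
  | case3 c d t hcd ih =>
    obtain ⟨hc, hd⟩ := hcd
    subst hc; subst hd
    rw [pvAltGo, if_pos ⟨rfl, rfl⟩, pvPairRep, if_pos ⟨rfl, rfl⟩]
    simp only [List.map_cons, ih]
    simp [mrep]
  | case4 c d t hcd ih =>
    rw [pvAltGo, if_neg hcd, pvPairRep, if_neg hcd]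
    simp only [List.map_cons, ih, tbl_ok]

theorem main_eq (text : String) : deobfuscate_text text = deobfuscate_text_alt text := by
  have h : (deobfuscate_text text).toList = (deobfuscate_text_alt text).toList := by
    rw [deobfuscate_text_alt, String.toList_ofList, altGo_eq]
    rw [deobfuscate_text, pvItems]
    simp only [List.foldl_cons, List.foldl_nil]
    simp only [PySem.Str.toList_replace]
    rw [show ("@" : String).toList = ['@'] from rfl, show ("a" : String).toList = ['a'] from rfl,
        show ("4" : String).toList = ['4'] from rfl, show ("/\\" : String).toList = ['/', '\\'] from rfl,
        show ("3" : String).toList = ['3'] from rfl, show ("e" : String).toList = ['e'] from rfl,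
        show ("#" : String).toList = ['#'] from rfl, show ("1" : String).toList = ['1'] from rfl,
        show ("i" : String).toList = ['i'] from rfl, show ("!" : String).toList = ['!'] from rfl,
        show ("|" : String).toList = ['|'] from rfl, show ("0" : String).toList = ['0'] from rfl,
        show ("o" : String).toList = ['o'] from rfl, show ("$" : String).toList = ['$'] from rfl,
        show ("5" : String).toList = ['5'] from rfl, show ("&" : String).toList = ['&'] from rfl,
        show ("s" : String).toList = ['s'] from rfl, show ("+" : String).toList = ['+'] from rfl,
        show ("t" : String).toList = ['t'] from rfl, show ("7" : String).toList = ['7'] from rfl]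
    simp only [replace_single, replace_pair]
    rw [pairRep_map (mrep '4' 'a') rfl rfl rfl
          (fun c => mrep_ne '4' 'a' '/' c (by decide) (by decide))
          (fun c => mrep_ne '4' 'a' '\\' c (by decide) (by decide)),
        pairRep_map (mrep '@' 'a') rfl rfl rfl
          (fun c => mrep_ne '@' 'a' '/' c (by decide) (by decide))
          (fun c => mrep_ne '@' 'a' '\\' c (by decide) (by decide))]
  have := congrArg String.ofList h
  simpa [String.ofList_toList] using this

-- ===== VERDICT (by name: the statement is the Claim_ definition above) =====
theorem deobfuscate_text_spec : Claim_equal_deobfuscate_text := by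
  intro text _
  unfold Spec_deobfuscate_text
  exact main_eq text
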